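-- pv_equiv track=rewrite | github.com/amanimran786/jarvis-ai | local_runtime/local_training.py | _assistant_answer_for_prompt
-- ===== SOURCE A (Python) =====
-- def _assistant_answer_for_prompt(example: dict) -> tuple[str, str]:
--     prompt = ""
--     answer = ""
--     for message in example.get("messages", []):
--         if message.get("role") == "user" and message.get("content"):
--             prompt = str(message["content"]).strip()
--         if message.get("role") == "assistant" and message.get("content"):
--             answer = str(message["content"]).strip()
--     return prompt, answer
-- ===== SOURCE B (Python) =====
-- def _assistant_answer_for_prompt(example: dict) -> tuple[str, str]:
--     messages = example.get("messages", [])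
--     prompt = next((str(m["content"]).strip() for m in reversed(messages)
--                    if m.get("role") == "user" and m.get("content")), "")
--     answer = next((str(m["content"]).strip() for m in reversed(messages)
--                    if m.get("role") == "assistant" and m.get("content")), "")
--     return prompt, answer
-- ===== Notes on version B (the rewrite author's own statement) =====
-- stated objective: idiomatic
-- what changed: Replaces the forward loop that overwrites prompt/answer on every matching message with two reverse-order next() searches that stop at the first (i.e. last) matching user/assistant message.
import Mathlib
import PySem

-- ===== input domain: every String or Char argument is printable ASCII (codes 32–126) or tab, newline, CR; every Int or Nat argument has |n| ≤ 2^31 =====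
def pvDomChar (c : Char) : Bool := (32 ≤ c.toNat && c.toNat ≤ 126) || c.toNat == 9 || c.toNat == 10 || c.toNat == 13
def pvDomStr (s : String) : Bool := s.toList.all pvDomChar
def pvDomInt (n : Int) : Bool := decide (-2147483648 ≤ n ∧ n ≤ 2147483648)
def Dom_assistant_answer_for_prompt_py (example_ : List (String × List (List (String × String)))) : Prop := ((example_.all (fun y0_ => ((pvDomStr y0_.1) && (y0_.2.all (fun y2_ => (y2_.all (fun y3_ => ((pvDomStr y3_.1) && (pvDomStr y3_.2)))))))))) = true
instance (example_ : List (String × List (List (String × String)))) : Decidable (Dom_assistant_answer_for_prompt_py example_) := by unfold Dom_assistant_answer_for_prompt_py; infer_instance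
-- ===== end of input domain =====

-- B replaces A's forward overwrite-loop with two reverse-order searches (more idiomatic; same values).

-- shared dict primitive: first-match association-list lookup (= dict.get)
def pvAlGet? {V : Type} (d : List (String × V)) (k : String) : Option V :=
  (d.find? (fun p => p.1 == k)).map (·.2)

-- message.get("content") with missing key read as "" (both are falsy in Python)
def pvContent (m : List (String × String)) : String :=
  (pvAlGet? m "content").getD ""

-- ===== PORT A =====
def pvStepA (st : String × String) (m : List (String × String)) : String × String :=
  let st1 := if pvAlGet? m "role" == some "user" && pvContent m != "" then
      (PySem.Str.strip (pvContent m), st.2) else st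
  if pvAlGet? m "role" == some "assistant" && pvContent m != "" then
      (st1.1, PySem.Str.strip (pvContent m)) else st1

def assistant_answer_for_prompt_py (example_ : List (String × List (List (String × String)))) : String × String :=
  ((pvAlGet? example_ "messages").getD []).foldl pvStepA ("", "")

-- ===== PORT B =====
def pvPick (role : String) (msgs : List (List (String × String))) : String :=
  match msgs.reverse.find? (fun m => pvAlGet? m "role" == some role && pvContent m != "") with
  | some m => PySem.Str.strip (pvContent m)
  | none => ""

def assistant_answer_for_prompt_py_alt (example_ : List (String × List (List (String × String)))) : String × String :=
  let msgs := (pvAlGet? example_ "messages").getD []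
  (pvPick "user" msgs, pvPick "assistant" msgs)

-- ===== PRECONDITION & SPEC =====
def Spec_assistant_answer_for_prompt_py (example_ : List (String × List (List (String × String)))) (out : String × String) : Prop := out = assistant_answer_for_prompt_py_alt example_
instance (example_ : List (String × List (List (String × String)))) (out : String × String) : Decidable (Spec_assistant_answer_for_prompt_py example_ out) := by unfold Spec_assistant_answer_for_prompt_py; infer_instance

-- ===== CLAIM (what is proved, stated in full; the proofs are below) =====
def Claim_equal_assistant_answer_for_prompt_py : Prop := ∀ (example_ : List (String × List (List (String × String)))), Dom_assistant_answer_for_prompt_py example_ → Spec_assistant_answer_for_prompt_py example_ (assistant_answer_for_prompt_py example_)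

-- ===== LEMMAS AND PROOFS =====

lemma pvStepA_fst (st : String × String) (m : List (String × String)) :
    (pvStepA st m).1 =
      if pvAlGet? m "role" == some "user" && pvContent m != "" then
        PySem.Str.strip (pvContent m) else st.1 := by
  unfold pvStepA; split_ifs <;> simp_all

lemma pvStepA_snd (st : String × String) (m : List (String × String)) :
    (pvStepA st m).2 =
      if pvAlGet? m "role" == some "assistant" && pvContent m != "" then
        PySem.Str.strip (pvContent m) else st.2 := by
  unfold pvStepA; split_ifs <;> simp_all

lemma foldl_fst_eq (msgs : List (List (String × String))) :
    ∀ st : String × String,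
      (msgs.foldl pvStepA st).1 =
        match msgs.reverse.find? (fun m => pvAlGet? m "role" == some "user" && pvContent m != "") with
        | some m => PySem.Str.strip (pvContent m)
        | none => st.1 := by
  induction msgs with
  | nil => intro st; simp
  | cons m ms ih =>
    intro st
    simp only [List.foldl_cons, List.reverse_cons, List.find?_append, ih]
    cases h : ms.reverse.find? (fun m => pvAlGet? m "role" == some "user" && pvContent m != "") with
    | some m' => simp [Option.or]
    | none =>
      simp only [Option.or, List.find?_singleton]
      rw [pvStepA_fst]
      split_ifs with hc <;> simp

lemma foldl_snd_eq (msgs : List (List (String × String))) :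
    ∀ st : String × String,
      (msgs.foldl pvStepA st).2 =
        match msgs.reverse.find? (fun m => pvAlGet? m "role" == some "assistant" && pvContent m != "") with
        | some m => PySem.Str.strip (pvContent m)
        | none => st.2 := by
  induction msgs with
  | nil => intro st; simp
  | cons m ms ih =>
    intro st
    simp only [List.foldl_cons, List.reverse_cons, List.find?_append, ih]
    cases h : ms.reverse.find? (fun m => pvAlGet? m "role" == some "assistant" && pvContent m != "") with
    | some m' => simp [Option.or]
    | none =>
      simp only [Option.or, List.find?_singleton]
      rw [pvStepA_snd]
      split_ifs with hc <;> simp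

-- ===== VERDICT (by name: the statement is the Claim_ definition above) =====
theorem assistant_answer_for_prompt_py_spec : Claim_equal_assistant_answer_for_prompt_py := by
  intro example_ _
  unfold Spec_assistant_answer_for_prompt_py assistant_answer_for_prompt_py
    assistant_answer_for_prompt_py_alt pvPick
  refine Prod.ext ?_ ?_
  · rw [foldl_fst_eq]
  · rw [foldl_snd_eq]
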